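-- pv_equiv track=rewrite | github.com/sushantMoon/Personal-Development | Spoj-HackerRank/Decibinary.py | convert_to_db
-- ===== SOURCE A (Python) =====
-- def convert_to_db(decibin):
--     original_value = decibin
--     two_power_i = 1
--     return_value = 0
--     while(decibin > 0):
--         return_value += ((decibin%10) * two_power_i)
--         decibin = int(decibin / 10)
--         two_power_i = two_power_i * 2
--     return (original_value, int(return_value))
-- ===== SOURCE B (Python) =====
-- def convert_to_db(decibin):
--     # Stage 1: extract the decimal digits, least-significant first.
--     digits = []
--     d = decibin
--     while d > 0:
--         digits.append(d % 10)
--         d //= 10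
--     # Stage 2: Horner evaluation in base 2 over the digits, most-significant first.
--     value = 0
--     for dg in reversed(digits):
--         value = value * 2 + dg
--     return (decibin, value)
-- ===== Notes on version B (the rewrite author's own statement) =====
-- stated objective: alternative
-- what changed: Replaces A's single loop carrying an explicit power-of-two accumulator with two staged passes: first build the list of decimal digits, then evaluate it most-significant-first by a base-2 Horner fold, so no power accumulator is maintained.
import Mathlib
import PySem

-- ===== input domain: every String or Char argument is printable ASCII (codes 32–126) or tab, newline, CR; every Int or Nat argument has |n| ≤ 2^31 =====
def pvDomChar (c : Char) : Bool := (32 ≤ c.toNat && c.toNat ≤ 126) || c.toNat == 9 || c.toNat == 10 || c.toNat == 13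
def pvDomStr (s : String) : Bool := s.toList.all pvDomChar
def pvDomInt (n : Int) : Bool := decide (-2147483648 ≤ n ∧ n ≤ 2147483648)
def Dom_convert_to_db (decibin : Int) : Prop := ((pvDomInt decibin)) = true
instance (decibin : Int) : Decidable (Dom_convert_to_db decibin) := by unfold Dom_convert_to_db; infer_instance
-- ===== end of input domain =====

-- B replaces A's single loop with its power-of-two accumulator by two staged passes
-- (extract the digit list, then a base-2 Horner fold over it); objective: alternative decomposition, same cost.
-- Note on A's 'int(decibin / 10)': Python float division then truncation; on Dom (|decibin| ≤ 2^31 < 2^53)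
-- it equals floor division for the positive values the loop sees, so the port uses PySem.Int.floordiv — exact on the stated domain.

-- ===== PORT A =====
def convertLoop (decibin two_power_i return_value : Int) : Int :=
  if decibin > 0 then
    convertLoop (PySem.Int.floordiv decibin 10) (two_power_i * 2)
      (return_value + (PySem.Int.mod decibin 10) * two_power_i)
  else return_value
termination_by decibin.toNat
decreasing_by
  have h10 : (0:Int) < 10 := by norm_num
  have := PySem.Int.floordiv_eq_ediv_of_pos (a := decibin) h10
  omega

def convert_to_db (decibin : Int) : Int × Int :=
  (decibin, convertLoop decibin 1 0)

-- ===== PORT B =====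
-- stage 1 of Source B: the while-loop appending d % 10 and flooring d
def digitsOf (d : Int) : List Int :=
  if d > 0 then PySem.Int.mod d 10 :: digitsOf (PySem.Int.floordiv d 10)
  else []
termination_by d.toNat
decreasing_by
  have h10 : (0:Int) < 10 := by norm_num
  have := PySem.Int.floordiv_eq_ediv_of_pos (a := d) h10
  omega

def convert_to_db_alt (decibin : Int) : Int × Int :=
  -- stage 2 of Source B: for dg in reversed(digits): value = value * 2 + dg
  (decibin, (digitsOf decibin).reverse.foldl (fun value dg => value * 2 + dg) 0)

-- ===== PRECONDITION & SPEC =====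
def Spec_convert_to_db (decibin : Int) (out : Int × Int) : Prop := out = convert_to_db_alt decibin
instance (decibin : Int) (out : Int × Int) : Decidable (Spec_convert_to_db decibin out) := by unfold Spec_convert_to_db; infer_instance

-- ===== CLAIM (what is proved, stated in full; the proofs are below) =====
def Claim_equal_convert_to_db : Prop := ∀ (decibin : Int), Dom_convert_to_db decibin → Spec_convert_to_db decibin (convert_to_db decibin)

-- ===== LEMMAS AND PROOFS =====
-- Horner over the reversed digit list = right fold dg + 2*acc over the list.
theorem horner_reverse (l : List Int) :
    l.reverse.foldl (fun value dg => value * 2 + dg) 0 =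
      l.foldr (fun dg acc => dg + 2 * acc) 0 := by
  rw [List.foldl_reverse]
  induction l with
  | nil => rfl
  | cons x xs ih => simp [List.foldr, ih]; ring

theorem convertLoop_eq_aux : ∀ (n : Nat) (d : Int), d.toNat = n → ∀ (p r : Int),
    convertLoop d p r = r + p * (digitsOf d).foldr (fun dg acc => dg + 2 * acc) 0 := by
  intro n
  induction n using Nat.strong_induction_on with
  | _ n ih =>
    intro d hn p r
    rw [convertLoop, digitsOf]
    by_cases hd : d > 0
    · simp only [if_pos hd, List.foldr]
      have h10 : (0:Int) < 10 := by norm_num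
      have hdiv := PySem.Int.floordiv_eq_ediv_of_pos (a := d) h10
      rw [ih (PySem.Int.floordiv d 10).toNat (by omega) _ rfl]
      ring
    · simp only [if_neg hd, List.foldr]
      ring

-- ===== VERDICT (by name: the statement is the Claim_ definition above) =====
theorem convert_to_db_spec : Claim_equal_convert_to_db := by
  intro d _
  unfold Spec_convert_to_db convert_to_db convert_to_db_alt
  rw [horner_reverse, convertLoop_eq_aux d.toNat d rfl]
  ring_nf
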